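-- pv_equiv track=rewrite | github.com/mikhail-sergeev/python-eng | exercises/17_serialization/task_17_3.py | parse_sh_cdp_neighbors
-- ===== SOURCE A (Python) =====
-- def parse_sh_cdp_neighbors(command_output):
--     result = {}
--     device = ""
--     stage = 0
--     for line in command_output.split("\n"):
--         if ">" in line and stage == 0:
--             device = line.split(">")[0]
--             stage = 1
--             continue
--         if "Device" in line and stage == 1:
--             stage = 2
--             continue
--         if stage == 2 and line.strip():
--             router,int1,int2,ttl,*other = line.split()
--             *other,model,int3,int4 = line.split()
--             inp = f"{int1} {int2}"
--             outp = {router: f"{int3} {int4}"}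
--             result[inp] = outp
--     return {device: result}
-- ===== SOURCE B (Python) =====
-- def parse_sh_cdp_neighbors(command_output):
--     # String-index algorithm: locate the device, the header and the data section by character
--     # positions in the raw string (find + slicing); only the data section is ever
--     # split into lines, and the table is built by a dict comprehension.
--     gi = command_output.find(">")
--     if gi == -1:
--         return {"": {}}
--     device = command_output[:gi].split("\n")[-1]
--     eol = command_output.find("\n", gi)
--     if eol == -1:
--         return {device: {}}
--     di = command_output.find("Device", eol + 1)
--     if di == -1:
--         return {device: {}}
--     eol2 = command_output.find("\n", di)
--     if eol2 == -1:
--         return {device: {}}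
--     rows = [line.split() for line in command_output[eol2 + 1:].split("\n") if line.strip()]
--     return {device: {f"{t[1]} {t[2]}": {t[0]: f"{t[-2]} {t[-1]}"} for t in rows}}
-- ===== Notes on version B (the rewrite author's own statement) =====
-- stated objective: alternative
-- what changed: A's single pass over all lines with a three-valued stage flag is replaced by character-index arithmetic on the raw string: str.find locates the prompt marker, the table header and the line boundaries, slicing extracts the device name and the data section, and only the data section is ever split into lines, feeding a dict comprehension.
import Mathlib
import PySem

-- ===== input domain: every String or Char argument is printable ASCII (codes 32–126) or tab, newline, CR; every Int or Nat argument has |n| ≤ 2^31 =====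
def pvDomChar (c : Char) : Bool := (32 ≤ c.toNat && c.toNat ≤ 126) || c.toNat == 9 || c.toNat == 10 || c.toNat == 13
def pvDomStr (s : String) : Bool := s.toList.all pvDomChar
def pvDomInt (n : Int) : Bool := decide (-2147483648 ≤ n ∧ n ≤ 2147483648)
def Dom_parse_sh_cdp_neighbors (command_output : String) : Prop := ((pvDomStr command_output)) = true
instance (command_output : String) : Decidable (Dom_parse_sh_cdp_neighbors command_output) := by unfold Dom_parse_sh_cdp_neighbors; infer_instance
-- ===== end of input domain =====

-- B replaces A's per-line three-state scan with character-index arithmetic on the raw string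
-- (str.find locates the prompt marker, the table header and the line boundaries; slicing extracts
-- the device and the data section, which alone is split into lines); objective: alternative, same cost.

-- ===== PORT A =====
-- one step of A's for-loop; state = (result, device, stage)
def pvStepA (st : PySem.Dict String (List (String × String)) × String × Nat) (line : String) :
    PySem.Dict String (List (String × String)) × String × Nat :=
  let result := st.1
  let device := st.2.1
  let stage := st.2.2
  if PySem.Str.isIn ">" line && stage == 0 then
    (result, ((PySem.Str.split? line ">").getD []).headD "", 1)
  else if PySem.Str.isIn "Device" line && stage == 1 then
    (result, device, 2)
  else if stage == 2 && !(PySem.Str.strip line == "") then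
    -- router,int1,int2,ttl,*other = line.split(); *other,model,int3,int4 = line.split()
    -- (a failing unpack is a ValueError in Python; those inputs are excluded by Pre_)
    match PySem.Str.split₀ line with
    | router :: int1 :: int2 :: _ttl :: _other =>
      match (PySem.Str.split₀ line).reverse with
      | int4 :: int3 :: _model :: _other2 =>
        (result.insert (int1 ++ " " ++ int2) [(router, int3 ++ " " ++ int4)], device, stage)
      | _ => (result, device, stage)
    | _ => (result, device, stage)
  else
    (result, device, stage)

def parse_sh_cdp_neighbors (command_output : String) : List (String × List (String × List (String × String))) :=
  let fin := ((PySem.Str.split? command_output "\n").getD []).foldl pvStepA (PySem.Dict.empty, "", 0)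
  [(fin.2.1, fin.1.items)]

-- ===== PORT B =====
-- one row of B's dict comprehension: t[1],t[2],t[0],t[-2],t[-1] indexing (pyGetD is the
-- total form of t[i]; under Pre_ every row has ≥ 4 tokens, so every index is in range)
def pvRowStep (d : PySem.Dict String (List (String × String))) (t : List String) :
    PySem.Dict String (List (String × String)) :=
  d.insert (PySem.List.pyGetD t 1 "" ++ " " ++ PySem.List.pyGetD t 2 "")
    [(PySem.List.pyGetD t 0 "", PySem.List.pyGetD t (-2) "" ++ " " ++ PySem.List.pyGetD t (-1) "")]

def parse_sh_cdp_neighbors_alt (command_output : String) : List (String × List (String × List (String × String))) :=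
  let gi := PySem.Str.find command_output ">"
  if gi = -1 then [("", [])] else
  -- device = command_output[:gi].split("\n")[-1]  (split("\n") is never empty, so [-1] is total)
  let device := PySem.List.pyGetD
    ((PySem.Str.split? (PySem.Str.slice command_output none (some gi)) "\n").getD []) (-1) ""
  let eol := PySem.Str.findFrom command_output "\n" gi
  if eol = -1 then [(device, [])] else
  let di := PySem.Str.findFrom command_output "Device" (eol + 1)
  if di = -1 then [(device, [])] else
  let eol2 := PySem.Str.findFrom command_output "\n" di
  if eol2 = -1 then [(device, [])] else
  -- rows = [line.split() for line in command_output[eol2+1:].split("\n") if line.strip()]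
  let rows := (((PySem.Str.split? (PySem.Str.slice command_output (some (eol2 + 1)) none) "\n").getD []).filter
      (fun l => !(PySem.Str.strip l == ""))).map PySem.Str.split₀
  [(device, (rows.foldl pvRowStep PySem.Dict.empty).items)]

-- ===== PRECONDITION & SPEC =====
-- the data lines of the output: everything after the first header line that follows the first prompt line
def pvDataLinesOf (command_output : String) : List String :=
  let lines := (PySem.Str.split? command_output "\n").getD []
  match lines.findIdx? (fun l => PySem.Str.isIn ">" l) with
  | none => []
  | some i =>
    match (lines.drop (i + 1)).findIdx? (fun l => PySem.Str.isIn "Device" l) with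
    | none => []
    | some j => (lines.drop (i + 1)).drop (j + 1)

-- Pre_ excludes exactly the inputs where Python A raises ValueError: a non-blank data line
-- with fewer than 4 whitespace-separated tokens makes A's unpacking fail.
def Pre_parse_sh_cdp_neighbors (command_output : String) : Prop :=
  ∀ l ∈ pvDataLinesOf command_output,
    PySem.Str.strip l ≠ "" → 4 ≤ (PySem.Str.split₀ l).length
instance (command_output : String) : Decidable (Pre_parse_sh_cdp_neighbors command_output) := by
  unfold Pre_parse_sh_cdp_neighbors; infer_instance

def pvWitness_parse_sh_cdp_neighbors : String :=
  "R1>show cdp neighbors\nDevice ID  Local Intrfce\nR2 Eth 0/0 120 R S I 2811 Gig 0/1\n\nR3 Eth 0/1 140 S I 2811 Gig 0/2"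

def Spec_parse_sh_cdp_neighbors (command_output : String) (out : List (String × List (String × List (String × String)))) : Prop := out = parse_sh_cdp_neighbors_alt command_output
instance (command_output : String) (out : List (String × List (String × List (String × String)))) : Decidable (Spec_parse_sh_cdp_neighbors command_output out) := by unfold Spec_parse_sh_cdp_neighbors; infer_instance

-- ===== CLAIM (what is proved, stated in full; the proofs are below) =====
def Claim_equal_parse_sh_cdp_neighbors : Prop := ∀ (command_output : String), Dom_parse_sh_cdp_neighbors command_output → Pre_parse_sh_cdp_neighbors command_output → Spec_parse_sh_cdp_neighbors command_output (parse_sh_cdp_neighbors command_output)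

-- ===== LEMMAS AND PROOFS =====

-- A's state machine, phase by phase (proof-side recursions)
def pvFindGt : List String → Option (String × List String)
  | [] => none
  | l :: ls =>
    if PySem.Str.isIn ">" l then some (((PySem.Str.split? l ">").getD []).headD "", ls)
    else pvFindGt ls

def pvFindDev : List String → Option (List String)
  | [] => none
  | l :: ls => if PySem.Str.isIn "Device" l then some ls else pvFindDev ls

def pvDataStep (result : PySem.Dict String (List (String × String))) (line : String) :
    PySem.Dict String (List (String × String)) :=
  if PySem.Str.strip line == "" then result
  else
    match PySem.Str.split₀ line with
    | router :: int1 :: int2 :: _ttl :: _ =>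
      match (PySem.Str.split₀ line).reverse with
      | int4 :: int3 :: _ =>
        result.insert (int1 ++ " " ++ int2) [(router, int3 ++ " " ++ int4)]
      | _ => result
    | _ => result

theorem pvFoldA_stage0 (lines : List String) (res : PySem.Dict String (List (String × String))) (dev : String) :
    lines.foldl pvStepA (res, dev, 0) =
      match pvFindGt lines with
      | none => (res, dev, 0)
      | some (d, ls) => ls.foldl pvStepA (res, d, 1) := by
  induction lines generalizing res dev with
  | nil => simp [pvFindGt]
  | cons l ls ih =>
    by_cases h : PySem.Chars.isIn ['>'] l.toList
    · simp [pvFindGt, h, pvStepA]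
    · simp [pvFindGt, h, pvStepA, ih]

theorem pvFoldA_stage1 (lines : List String) (res : PySem.Dict String (List (String × String))) (dev : String) :
    lines.foldl pvStepA (res, dev, 1) =
      match pvFindDev lines with
      | none => (res, dev, 1)
      | some ls => ls.foldl pvStepA (res, dev, 2) := by
  induction lines generalizing res dev with
  | nil => simp [pvFindDev]
  | cons l ls ih =>
    by_cases h : PySem.Chars.isIn ['D', 'e', 'v', 'i', 'c', 'e'] l.toList
    · simp [pvFindDev, h, pvStepA]
    · simp [pvFindDev, h, pvStepA, ih]

theorem pvStepA_stage2 (res : PySem.Dict String (List (String × String))) (dev : String) (l : String) :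
    pvStepA (res, dev, 2) l = (pvDataStep res l, dev, 2) := by
  rcases htoks : PySem.Str.split₀ l with _ | ⟨r, _ | ⟨i1, _ | ⟨i2, _ | ⟨t, rest⟩⟩⟩⟩ <;>
    by_cases h : PySem.Str.strip l == ""
  all_goals try simp [pvStepA, pvDataStep, h, htoks]
  rcases rest.reverse with _ | ⟨x, _ | ⟨y, _ | ⟨z, zs⟩⟩⟩ <;> simp

theorem pvFoldA_stage2 (lines : List String) (res : PySem.Dict String (List (String × String))) (dev : String) :
    lines.foldl pvStepA (res, dev, 2) = (lines.foldl pvDataStep res, dev, 2) := by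
  induction lines generalizing res with
  | nil => simp
  | cons l ls ih => simp [pvStepA_stage2, ih]

-- ---- the line structure of a string: PySem's splitOn on a one-char separator ----
def pvSplitC (c : Char) (pre : List Char) : List Char → List (List Char)
  | [] => [pre]
  | x :: r => if x = c then pre :: pvSplitC c [] r else pvSplitC c (pre ++ [x]) r

theorem pvSplitC_ne_nil (c : Char) (pre l : List Char) : pvSplitC c pre l ≠ [] := by
  induction l generalizing pre with
  | nil => simp [pvSplitC]
  | cons x r ih => by_cases h : x = c <;> simp [pvSplitC, h, ih]

theorem pvSplitC_no_sep (c : Char) (pre l : List Char) (h : c ∉ l) :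
    pvSplitC c pre l = [pre ++ l] := by
  induction l generalizing pre with
  | nil => simp [pvSplitC]
  | cons x r ih =>
    have hx : ¬ x = c := by rintro rfl; exact h (List.mem_cons_self)
    simp only [pvSplitC, if_neg hx, ih _ (fun hm => h (List.mem_cons_of_mem _ hm))]
    simp

theorem pvSplitC_append_sep (c : Char) (pre a b : List Char) (h : c ∉ a) :
    pvSplitC c pre (a ++ c :: b) = (pre ++ a) :: pvSplitC c [] b := by
  induction a generalizing pre with
  | nil => simp [pvSplitC]
  | cons x r ih =>
    have hx : ¬ x = c := by rintro rfl; exact h (List.mem_cons_self)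
    simp only [List.cons_append, pvSplitC, if_neg hx,
      ih _ (fun hm => h (List.mem_cons_of_mem _ hm))]
    simp

theorem pvSplitC_head? (c : Char) (pre l : List Char) :
    (pvSplitC c pre l).head? = some (pre ++ l.takeWhile (· ≠ c)) := by
  induction l generalizing pre with
  | nil => simp [pvSplitC]
  | cons x r ih =>
    by_cases h : x = c
    · subst h; simp [pvSplitC, List.takeWhile]
    · simp [pvSplitC, h, ih]

theorem pvSplitOn_go_eq (c : Char) :
    ∀ fuel (l cur acc : _), l.length < fuel →
      PySem.Chars.splitOn.go [c] fuel l cur acc = acc.reverse ++ pvSplitC c cur.reverse l := by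
  intro fuel
  induction fuel with
  | zero => intro l cur acc h; omega
  | succ n ih =>
    intro l cur acc h
    cases l with
    | nil => simp [PySem.Chars.splitOn.go, pvSplitC]
    | cons x r =>
      by_cases hx : x = c
      · subst hx
        rw [show PySem.Chars.splitOn.go [x] (n+1) (x :: r) cur acc
              = PySem.Chars.splitOn.go [x] n (List.drop 1 (x :: r)) [] (cur.reverse :: acc) from by
            simp [PySem.Chars.splitOn.go, List.isPrefixOf]]
        rw [ih _ _ _ (by simpa using Nat.lt_of_succ_lt_succ h)]
        simp [pvSplitC]
      · rw [show PySem.Chars.splitOn.go [c] (n+1) (x :: r) cur acc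
              = PySem.Chars.splitOn.go [c] n r (x :: cur) acc from by
            simp [PySem.Chars.splitOn.go, List.isPrefixOf, Ne.symm hx]]
        rw [ih _ _ _ (by simpa using Nat.lt_of_succ_lt_succ h)]
        simp [pvSplitC, hx]

theorem pvSplitOn_eq (s : List Char) (c : Char) :
    PySem.Chars.splitOn s [c] = pvSplitC c [] s := by
  unfold PySem.Chars.splitOn
  rw [pvSplitOn_go_eq c (s.length + 1) s [] [] (by omega)]
  simp

theorem pvLines_decomp (c : Char) (cs : List Char) :
    c ∉ cs ∨ ∃ a b, cs = a ++ c :: b ∧ c ∉ a := by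
  induction cs with
  | nil => left; simp
  | cons x r ih =>
    by_cases hx : x = c
    · subst hx; right; exact ⟨[], r, by simp⟩
    · rcases ih with h | ⟨a, b, rfl, ha⟩
      · left; simp only [List.mem_cons, not_or]; exact ⟨fun hc => hx hc.symm, h⟩
      · right; exact ⟨x :: a, b, by simp, by simp only [List.mem_cons, not_or]; exact ⟨fun hc => hx hc.symm, ha⟩⟩

-- ---- find on char lists ----

theorem pvPrefix_through_sep (pat x b : List Char) (d : Char)
    (hd : d ∉ pat) : pat <+: (x ++ d :: b) ↔ pat <+: x := by
  constructor
  · intro hp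
    by_cases hle : pat.length ≤ x.length
    · have := List.prefix_iff_eq_take.mp hp
      rw [List.take_append_of_le_length hle] at this
      rw [this]
      exact List.take_prefix _ _
    · exfalso
      apply hd
      have hlt : x.length < pat.length := by omega
      have hg : pat[x.length] = (x ++ d :: b)[x.length]'(by simp) := hp.getElem hlt
      have hd2 : (x ++ d :: b)[x.length]'(by simp) = d := by
        simp [List.getElem_append_right (Nat.le_refl x.length)]
      rw [hd2] at hg
      rw [← hg]
      exact List.getElem_mem _
  · intro hp; exact hp.trans (List.prefix_append x (d :: b))

theorem pvInfix_iff_exists_drop (pat s : List Char) :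
    pat <:+: s ↔ ∃ j, pat <+: s.drop j := by
  rw [← PySem.Chars.isIn_iff_infix, ← PySem.Chars.exists_prefix_drop_iff_isIn]

theorem pvInfix_append_sep (pat a b : List Char) (d : Char) (hd : d ∉ pat) :
    pat <:+: (a ++ d :: b) ↔ pat <:+: a ∨ pat <:+: b := by
  rw [pvInfix_iff_exists_drop, pvInfix_iff_exists_drop, pvInfix_iff_exists_drop]
  constructor
  · rintro ⟨j, hj⟩
    by_cases hja : j ≤ a.length
    · rw [List.drop_append_of_le_length hja, pvPrefix_through_sep pat _ b d hd] at hj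
      exact Or.inl ⟨j, hj⟩
    · right
      refine ⟨j - a.length - 1, ?_⟩
      have : (a ++ d :: b).drop j = b.drop (j - a.length - 1) := by
        have hj' : j = a.length + (j - a.length) := by omega
        rw [hj', List.drop_append]
        have : j - a.length = (j - a.length - 1) + 1 := by omega
        rw [this]
        simp
      rwa [this] at hj
  · rintro (⟨j, hj⟩ | ⟨j, hj⟩)
    · by_cases hja : j ≤ a.length
      · exact ⟨j, by rw [List.drop_append_of_le_length hja, pvPrefix_through_sep pat _ b d hd]; exact hj⟩
      · rw [List.drop_of_length_le (by omega)] at hj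
        have hp0 := List.prefix_nil.mp hj
        exact ⟨0, by simp [hp0]⟩
    · refine ⟨a.length + 1 + j, ?_⟩
      have : (a ++ d :: b).drop (a.length + 1 + j) = b.drop j := by
        rw [show a.length + 1 + j = a.length + (1 + j) by omega, List.drop_append]
        simp [Nat.add_comm 1 j]
      rwa [this]

theorem pvFind_eq_coe_iff (s pat : List Char) (k : Nat) :
    PySem.Chars.find s pat = (k : Int) ↔
      pat <+: s.drop k ∧ ∀ i < k, ¬ pat <+: s.drop i := by
  constructor
  · intro h
    have h0 : (0 : Int) ≤ PySem.Chars.find s pat := by rw [h]; positivity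
    obtain ⟨h1, h2⟩ := PySem.Chars.find_spec (s := s) (sub := pat) h0
    rw [h] at h1 h2
    simp only [Int.toNat_natCast] at h1 h2
    exact ⟨h1, fun i hi => h2 i hi⟩
  · rintro ⟨h1, h2⟩
    have hinf : pat <:+: s := h1.isInfix.trans (List.drop_suffix k s).isInfix
    have h0 : (0 : Int) ≤ PySem.Chars.find s pat := (PySem.Chars.find_nonneg_iff s pat).mpr hinf
    obtain ⟨g1, g2⟩ := PySem.Chars.find_spec (s := s) (sub := pat) h0
    have hjk : (PySem.Chars.find s pat).toNat = k := by
      rcases Nat.lt_trichotomy (PySem.Chars.find s pat).toNat k with h | h | h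
      · exact absurd g1 (h2 _ h)
      · exact h
      · exact absurd h1 (g2 k h)
    omega

theorem pvSingleton_prefix (c : Char) (y : List Char) : [c] <+: y ↔ y.head? = some c := by
  cases y with
  | nil => simp
  | cons x r => simp [List.cons_prefix_cons, eq_comm]

theorem pvFind_singleton_neg (c : Char) (s : List Char) (h : c ∉ s) :
    PySem.Chars.find s [c] = -1 := by
  rw [PySem.Chars.find_eq_neg_one_iff, List.singleton_infix_iff]
  exact h

theorem pvFind_append_sep_left (pat a b : List Char) (d : Char)
    (hIn : pat <:+: a) (hd : d ∉ pat) :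
    PySem.Chars.find (a ++ d :: b) pat = PySem.Chars.find a pat := by
  have h0 : (0 : Int) ≤ PySem.Chars.find a pat := (PySem.Chars.find_nonneg_iff a pat).mpr hIn
  set k := (PySem.Chars.find a pat).toNat with hk
  have hfk : PySem.Chars.find a pat = (k : Int) := by omega
  rw [hfk]
  obtain ⟨h1, h2⟩ := (pvFind_eq_coe_iff a pat k).mp hfk
  have hkla : k ≤ a.length := by
    by_contra hcon
    rw [List.drop_of_length_le (by omega)] at h1
    have := List.prefix_nil.mp h1
    subst this
    exact h2 0 (by omega) (List.nil_prefix)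
  rw [pvFind_eq_coe_iff]
  constructor
  · rw [List.drop_append_of_le_length hkla, pvPrefix_through_sep pat _ b d hd]
    exact h1
  · intro i hi
    rw [List.drop_append_of_le_length (by omega), pvPrefix_through_sep pat _ b d hd]
    exact h2 i hi

theorem pvFind_append_sep_right (pat a b : List Char) (d : Char)
    (hNot : ¬ pat <:+: a) (hd : d ∉ pat) :
    PySem.Chars.find (a ++ d :: b) pat =
      if PySem.Chars.find b pat = -1 then -1
      else (a.length : Int) + 1 + PySem.Chars.find b pat := by
  by_cases hb : PySem.Chars.find b pat = -1
  · rw [if_pos hb, PySem.Chars.find_eq_neg_one_iff, pvInfix_append_sep pat a b d hd]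
    rw [PySem.Chars.find_eq_neg_one_iff] at hb
    rintro (h | h)
    · exact hNot h
    · exact hb h
  · rw [if_neg hb]
    have hbinf : pat <:+: b := (PySem.Chars.find_ne_neg_one_iff b pat).mp hb
    have h0 : (0 : Int) ≤ PySem.Chars.find b pat := (PySem.Chars.find_nonneg_iff b pat).mpr hbinf
    set k := (PySem.Chars.find b pat).toNat with hk
    have hfk : PySem.Chars.find b pat = (k : Int) := by omega
    obtain ⟨h1, h2⟩ := (pvFind_eq_coe_iff b pat k).mp hfk
    rw [hfk, show (a.length : Int) + 1 + (k : Int) = ((a.length + 1 + k : Nat) : Int) by push_cast; ring]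
    rw [pvFind_eq_coe_iff]
    constructor
    · have : (a ++ d :: b).drop (a.length + 1 + k) = b.drop k := by
        rw [show a.length + 1 + k = a.length + (1 + k) by omega, List.drop_append]
        simp [Nat.add_comm 1 k]
      rw [this]; exact h1
    · intro i hi
      by_cases hia : i ≤ a.length
      · rw [List.drop_append_of_le_length hia, pvPrefix_through_sep pat _ b d hd]
        intro hp
        exact hNot (hp.isInfix.trans (List.drop_suffix i a).isInfix)
      · have : (a ++ d :: b).drop i = b.drop (i - a.length - 1) := by
          rw [show i = a.length + (i - a.length) by omega, List.drop_append,
            show i - a.length = (i - a.length - 1) + 1 by omega]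
          simp
        rw [this]
        exact h2 _ (by omega)

theorem pvFind_sep_singleton (c : Char) (x b : List Char) (h : c ∉ x) :
    PySem.Chars.find (x ++ c :: b) [c] = (x.length : Int) := by
  rw [pvFind_eq_coe_iff]
  constructor
  · rw [List.drop_left]
    exact ⟨b, rfl⟩
  · intro i hi
    rw [List.drop_append_of_le_length (by omega), pvSingleton_prefix]
    have hne : x.drop i ≠ [] := by
      intro hcon
      have := List.drop_eq_nil_iff.mp hcon
      omega
    rw [List.head?_append_of_ne_nil _ hne]
    intro hcon
    apply h
    have hhd : (x.drop i).head? = x[i]? := List.head?_drop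
    rw [hcon] at hhd
    exact List.mem_of_getElem? hhd.symm

theorem pvDropWhile_head (c : Char) (l : List Char) (h : c ∈ l) :
    (l.dropWhile (· ≠ c)).head? = some c := by
  induction l with
  | nil => simp at h
  | cons x r ih =>
    by_cases hx : x = c
    · subst hx; simp
    · rw [List.dropWhile_cons]
      simp only [decide_eq_true_eq]
      rw [if_pos (by simp [hx])]
      apply ih
      rcases List.mem_cons.mp h with h' | h'
      · exact absurd h'.symm hx
      · exact h'

theorem pvFind_singleton_mem (c : Char) (l : List Char) (h : c ∈ l) :
    PySem.Chars.find l [c] = ((l.takeWhile (· ≠ c)).length : Int) := by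
  rw [pvFind_eq_coe_iff]
  constructor
  · have hsplit : l.takeWhile (· ≠ c) ++ l.dropWhile (· ≠ c) = l := List.takeWhile_append_dropWhile
    rw [pvSingleton_prefix]
    calc (l.drop (l.takeWhile (· ≠ c)).length).head?
        = ((l.takeWhile (· ≠ c) ++ l.dropWhile (· ≠ c)).drop (l.takeWhile (· ≠ c)).length).head? := by rw [hsplit]
      _ = (l.dropWhile (· ≠ c)).head? := by rw [List.drop_left]
      _ = some c := pvDropWhile_head c l h
  · intro i hi
    rw [pvSingleton_prefix]
    have hpre : l.takeWhile (· ≠ c) <+: l := List.takeWhile_prefix _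
    have hgl : l[i]? = (l.takeWhile (· ≠ c))[i]? := by
      rw [List.prefix_iff_eq_take.mp hpre]
      · exact (List.getElem?_take_of_lt hi).symm
    rw [List.head?_drop, hgl]
    intro hcon
    have : c ∈ l.takeWhile (· ≠ c) := List.mem_of_getElem? hcon
    have := List.mem_takeWhile_imp this
    simp at this

theorem pvFound_lt_length (s pat : List Char) (k : Nat) (hne : pat ≠ [])
    (h : PySem.Chars.find s pat = (k : Int)) : k < s.length := by
  obtain ⟨h1, -⟩ := (pvFind_eq_coe_iff s pat k).mp h
  by_contra hcon
  rw [List.drop_of_length_le (by omega)] at h1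
  exact hne (List.prefix_nil.mp h1)


-- ---- bridges between the String-level ports and char-level line structure ----
theorem pvGetLast?_cons_of_ne_nil {α : Type} (x : α) (L : List α) (h : L ≠ []) :
    (x :: L).getLast? = L.getLast? := by
  cases L with
  | nil => exact absurd rfl h
  | cons y r => exact List.getLast?_cons_cons

theorem pvLines_map (s : String) :
    ((PySem.Str.split? s "\n").getD []).map String.toList = pvSplitC '\n' [] s.toList := by
  rw [PySem.Str.split?]
  rw [show ("\n" : String).toList = ['\n'] from rfl]
  rw [PySem.Chars.split?]
  rw [if_neg (by simp)]
  rw [pvSplitOn_eq]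
  simp [Function.comp_def]

theorem pvDevice_toList (s : String) :
    ((((PySem.Str.split? s ">").getD []).headD "") : String).toList
      = s.toList.takeWhile (· ≠ '>') := by
  rw [PySem.Str.split?]
  rw [show (">" : String).toList = ['>'] from rfl]
  rw [PySem.Chars.split?]
  rw [if_neg (by simp)]
  rw [pvSplitOn_eq]
  simp only [Option.map_some, Option.getD_some]
  rw [List.headD_eq_head?_getD]
  rw [List.head?_map, pvSplitC_head?]
  simp

theorem pvIsIn_gt (s : String) :
    PySem.Str.isIn ">" s = true ↔ '>' ∈ s.toList := by
  rw [PySem.Str.isIn_eq, PySem.Chars.isIn_iff_infix,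
    show (">" : String).toList = ['>'] from rfl, List.singleton_infix_iff]

theorem pvIsIn_dev (s : String) :
    PySem.Str.isIn "Device" s = true ↔ ("Device" : String).toList <:+: s.toList := by
  rw [PySem.Str.isIn_eq, PySem.Chars.isIn_iff_infix]

-- ---- ML1: the '>' phase, char-level ----
theorem pvML1 : ∀ (LS : List String) (cs : List Char),
    LS.map String.toList = pvSplitC '\n' [] cs →
    (match pvFindGt LS with
     | none => PySem.Chars.find cs ['>'] = -1
     | some (d, rest) => ∃ g : Nat, PySem.Chars.find cs ['>'] = (g : Int) ∧
         (pvSplitC '\n' [] (cs.take g)).getLast? = some d.toList ∧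
         ((rest = [] ∧ PySem.Chars.find (cs.drop g) ['\n'] = -1) ∨
          (∃ e : Nat, PySem.Chars.find (cs.drop g) ['\n'] = (e : Int) ∧
            rest.map String.toList = pvSplitC '\n' [] ((cs.drop g).drop (e + 1))))) := by
  intro LS
  induction LS with
  | nil =>
    intro cs h
    exact absurd h.symm (by simpa using pvSplitC_ne_nil '\n' [] cs)
  | cons s0 LS' ih =>
    intro cs h
    rcases pvLines_decomp '\n' cs with hno | ⟨a, b, rfl, ha⟩
    · -- single line
      rw [pvSplitC_no_sep '\n' [] cs hno] at h
      simp only [List.map_cons, List.nil_append] at h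
      obtain ⟨hs0, hLS'⟩ : s0.toList = cs ∧ LS' = [] := by
        have := List.cons.injEq (s0.toList) (LS'.map String.toList) cs [] ▸ h
        constructor
        · exact (List.cons_eq_cons.mp h).1
        · have := (List.cons_eq_cons.mp h).2
          exact List.map_eq_nil_iff.mp this
      subst hLS'
      by_cases hgt : PySem.Str.isIn ">" s0
      · rw [pvFindGt, if_pos hgt]
        have hmem : '>' ∈ cs := hs0 ▸ (pvIsIn_gt s0).mp hgt
        refine ⟨(cs.takeWhile (· ≠ '>')).length, pvFind_singleton_mem '>' cs hmem, ?_, ?_⟩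
        · have htake : cs.take (cs.takeWhile (· ≠ '>')).length = cs.takeWhile (· ≠ '>') :=
            (List.prefix_iff_eq_take.mp (List.takeWhile_prefix _)).symm
          rw [htake, pvSplitC_no_sep '\n' []
            _ (fun hm => hno ((List.takeWhile_prefix _).mem hm))]
          rw [pvDevice_toList, hs0]
          simp
        · left
          refine ⟨rfl, pvFind_singleton_neg _ _ (fun hm => hno ((List.drop_sublist _ _).mem hm))⟩
      · rw [pvFindGt, if_neg (by simpa using hgt)]
        rw [pvFindGt]
        have : ¬ '>' ∈ cs := fun hm => hgt ((pvIsIn_gt s0).mpr (hs0 ▸ hm))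
        exact pvFind_singleton_neg _ _ this
    · -- cs = a ++ '\n' :: b
      rw [pvSplitC_append_sep '\n' [] a b ha, List.nil_append] at h
      simp only [List.map_cons] at h
      obtain ⟨hs0, hmap⟩ := List.cons_eq_cons.mp h
      by_cases hgt : PySem.Str.isIn ">" s0
      · rw [pvFindGt, if_pos hgt]
        have hmem : '>' ∈ a := hs0 ▸ (pvIsIn_gt s0).mp hgt
        have hgle : (a.takeWhile (· ≠ '>')).length ≤ a.length :=
          (List.takeWhile_prefix _).length_le
        refine ⟨(a.takeWhile (· ≠ '>')).length, ?_, ?_, ?_⟩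
        · rw [pvFind_append_sep_left ['>'] a b '\n'
            ((List.singleton_infix_iff _ _).mpr hmem) (by decide)]
          exact pvFind_singleton_mem '>' a hmem
        · rw [List.take_append_of_le_length hgle]
          have htake : a.take (a.takeWhile (· ≠ '>')).length = a.takeWhile (· ≠ '>') :=
            (List.prefix_iff_eq_take.mp (List.takeWhile_prefix _)).symm
          rw [htake, pvSplitC_no_sep '\n' []
            _ (fun hm => ha ((List.takeWhile_prefix _).mem hm))]
          rw [pvDevice_toList, hs0]
          simp
        · right
          rw [List.drop_append_of_le_length hgle]
          refine ⟨(a.drop (a.takeWhile (· ≠ '>')).length).length, ?_, ?_⟩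
          · exact pvFind_sep_singleton '\n' _ b (fun hm => ha ((List.drop_sublist _ _).mem hm))
          · rw [show (a.drop (a.takeWhile (· ≠ '>')).length).length + 1
                = (a.drop (a.takeWhile (· ≠ '>')).length).length + 1 from rfl,
              List.drop_length_add_append]
            simpa using hmap
      · rw [pvFindGt, if_neg (by simpa using hgt)]
        have hnotA : ¬ ['>'] <:+: a := by
          rw [List.singleton_infix_iff]
          intro hm
          exact hgt ((pvIsIn_gt s0).mpr (hs0 ▸ hm))
        have := ih b hmap
        cases hfg : pvFindGt LS' with
        | none =>
          rw [hfg] at this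
          simp only [] at this ⊢
          rw [pvFind_append_sep_right ['>'] a b '\n' hnotA (by decide), if_pos this]
        | some p =>
          obtain ⟨d, rest⟩ := p
          rw [hfg] at this
          obtain ⟨gb, hgb, hdev, hrest⟩ := this
          refine ⟨a.length + 1 + gb, ?_, ?_, ?_⟩
          · rw [pvFind_append_sep_right ['>'] a b '\n' hnotA (by decide),
              if_neg (by rw [hgb]; exact fun hc => by omega), hgb]
            push_cast; ring
          · rw [show a.length + 1 + gb = a.length + (1 + gb) by omega,
              List.take_length_add_append]
            rw [show ('\n' :: b).take (1 + gb) = '\n' :: b.take gb by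
              rw [Nat.add_comm]; rfl]
            rw [pvSplitC_append_sep '\n' [] a _ ha, List.nil_append]
            rw [pvGetLast?_cons_of_ne_nil _ _ (pvSplitC_ne_nil _ _ _)]
            exact hdev
          · rw [show a.length + 1 + gb = a.length + (1 + gb) by omega,
              List.drop_length_add_append]
            rw [show ('\n' :: b).drop (1 + gb) = b.drop gb by
              rw [Nat.add_comm]; rfl]
            exact hrest


-- ---- ML2: the "Device" phase, char-level ----
theorem pvML2 : ∀ (LS : List String) (cs : List Char),
    LS.map String.toList = pvSplitC '\n' [] cs →
    (match pvFindDev LS with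
     | none => PySem.Chars.find cs ("Device" : String).toList = -1
     | some rest => ∃ dn : Nat, PySem.Chars.find cs ("Device" : String).toList = (dn : Int) ∧
         ((rest = [] ∧ PySem.Chars.find (cs.drop dn) ['\n'] = -1) ∨
          (∃ e : Nat, PySem.Chars.find (cs.drop dn) ['\n'] = (e : Int) ∧
            rest.map String.toList = pvSplitC '\n' [] ((cs.drop dn).drop (e + 1))))) := by
  intro LS
  induction LS with
  | nil =>
    intro cs h
    exact absurd h.symm (by simpa using pvSplitC_ne_nil '\n' [] cs)
  | cons s0 LS' ih =>
    intro cs h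
    rcases pvLines_decomp '\n' cs with hno | ⟨a, b, rfl, ha⟩
    · rw [pvSplitC_no_sep '\n' [] cs hno] at h
      simp only [List.map_cons, List.nil_append] at h
      obtain ⟨hs0, hLS'⟩ : s0.toList = cs ∧ LS' = [] :=
        ⟨(List.cons_eq_cons.mp h).1, List.map_eq_nil_iff.mp (List.cons_eq_cons.mp h).2⟩
      subst hLS'
      by_cases hdev : PySem.Str.isIn "Device" s0
      · rw [pvFindDev, if_pos hdev]
        have hinf : ("Device" : String).toList <:+: cs := hs0 ▸ (pvIsIn_dev s0).mp hdev
        have h0 : (0 : Int) ≤ PySem.Chars.find cs ("Device" : String).toList :=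
          (PySem.Chars.find_nonneg_iff _ _).mpr hinf
        refine ⟨(PySem.Chars.find cs ("Device" : String).toList).toNat, by omega, ?_⟩
        left
        exact ⟨rfl, pvFind_singleton_neg _ _ (fun hm => hno ((List.drop_sublist _ _).mem hm))⟩
      · rw [pvFindDev, if_neg (by simpa using hdev), pvFindDev]
        rw [PySem.Chars.find_eq_neg_one_iff]
        intro hinf
        exact hdev ((pvIsIn_dev s0).mpr (hs0 ▸ hinf))
    · rw [pvSplitC_append_sep '\n' [] a b ha, List.nil_append] at h
      simp only [List.map_cons] at h
      obtain ⟨hs0, hmap⟩ := List.cons_eq_cons.mp h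
      have hdnl : '\n' ∉ ("Device" : String).toList := by decide
      by_cases hdev : PySem.Str.isIn "Device" s0
      · rw [pvFindDev, if_pos hdev]
        have hinf : ("Device" : String).toList <:+: a := hs0 ▸ (pvIsIn_dev s0).mp hdev
        have h0 : (0 : Int) ≤ PySem.Chars.find a ("Device" : String).toList :=
          (PySem.Chars.find_nonneg_iff _ _).mpr hinf
        set dn := (PySem.Chars.find a ("Device" : String).toList).toNat with hdn
        have hfa : PySem.Chars.find a ("Device" : String).toList = (dn : Int) := by omega
        have hdla : dn ≤ a.length := by
          have := PySem.Chars.find_le_length (s := a) (sub := ("Device" : String).toList)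
          omega
        refine ⟨dn, ?_, ?_⟩
        · rw [pvFind_append_sep_left _ a b '\n' hinf hdnl]
          exact hfa
        · right
          rw [List.drop_append_of_le_length hdla]
          refine ⟨(a.drop dn).length, ?_, ?_⟩
          · exact pvFind_sep_singleton '\n' _ b (fun hm => ha ((List.drop_sublist _ _).mem hm))
          · rw [List.drop_length_add_append]
            simpa using hmap
      · rw [pvFindDev, if_neg (by simpa using hdev)]
        have hnotA : ¬ ("Device" : String).toList <:+: a := by
          intro hinf
          exact hdev ((pvIsIn_dev s0).mpr (hs0 ▸ hinf))
        have := ih b hmap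
        cases hfd : pvFindDev LS' with
        | none =>
          rw [hfd] at this
          simp only [] at this ⊢
          rw [pvFind_append_sep_right _ a b '\n' hnotA hdnl, if_pos this]
        | some rest =>
          rw [hfd] at this
          obtain ⟨db, hdb, hrest⟩ := this
          refine ⟨a.length + 1 + db, ?_, ?_⟩
          · rw [pvFind_append_sep_right _ a b '\n' hnotA hdnl,
              if_neg (by rw [hdb]; exact fun hc => by omega), hdb]
            push_cast; ring
          · rw [show a.length + 1 + db = a.length + (1 + db) by omega,
              List.drop_length_add_append,
              show ('\n' :: b).drop (1 + db) = b.drop db by rw [Nat.add_comm]; rfl]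
            exact hrest


-- ---- ML3: the data fold: B's filter/map comprehension = A's per-line step ----
theorem pvML3 : ∀ (ls : List String),
    (∀ l ∈ ls, PySem.Str.strip l ≠ "" → 4 ≤ (PySem.Str.split₀ l).length) →
    ∀ d : PySem.Dict String (List (String × String)),
    ((ls.filter (fun l => !(PySem.Str.strip l == ""))).map PySem.Str.split₀).foldl pvRowStep d
      = ls.foldl pvDataStep d := by
  intro ls
  induction ls with
  | nil => intro _ d; rfl
  | cons l r ih =>
    intro hpre d
    by_cases hb : PySem.Str.strip l == ""
    · rw [List.filter_cons_of_neg (by simp [hb]), List.foldl_cons,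
        pvDataStep, if_pos hb]
      exact ih (fun x hx => hpre x (List.mem_cons_of_mem _ hx)) d
    · rw [List.filter_cons_of_pos (by simp [hb]), List.map_cons, List.foldl_cons,
        List.foldl_cons]
      have h4 : 4 ≤ (PySem.Str.split₀ l).length :=
        hpre l List.mem_cons_self (by simpa using hb)
      have hstep : pvRowStep d (PySem.Str.split₀ l) = pvDataStep d l := by
        rcases ht : PySem.Str.split₀ l with _ | ⟨x0, _ | ⟨x1, _ | ⟨x2, _ | ⟨x3, rest⟩⟩⟩⟩ <;>
          rw [ht] at h4 <;> try (simp at h4)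
        rcases hrev : (x0 :: x1 :: x2 :: x3 :: rest).reverse with _ | ⟨y0, _ | ⟨y1, yr⟩⟩
        · simpa using congrArg List.length hrev
        · simpa using congrArg List.length hrev
        · have ht2 : x0 :: x1 :: x2 :: x3 :: rest = (yr.reverse ++ [y1]) ++ [y0] := by
            rw [← List.reverse_reverse (x0 :: x1 :: x2 :: x3 :: rest), hrev]; simp
          have e0 : PySem.List.pyGetD (x0 :: x1 :: x2 :: x3 :: rest) 0 "" = x0 :=
            PySem.List.pyGetD_zero_cons _ _ _
          have e1 : PySem.List.pyGetD (x0 :: x1 :: x2 :: x3 :: rest) 1 "" = x1 := by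
            simp [PySem.List.pyGetD_ofNat']
          have e2 : PySem.List.pyGetD (x0 :: x1 :: x2 :: x3 :: rest) 2 "" = x2 := by
            simp [PySem.List.pyGetD_ofNat']
          have em1 : PySem.List.pyGetD (x0 :: x1 :: x2 :: x3 :: rest) (-1) "" = y0 := by
            rw [ht2]; exact PySem.List.pyGetD_neg_one_append_singleton _ _ _
          have em2 : PySem.List.pyGetD (x0 :: x1 :: x2 :: x3 :: rest) (-2) "" = y1 := by
            rw [ht2, PySem.List.pyGetD_neg_ofNat _ 2 "" (by omega) (by simp)]
            simp
          rw [pvDataStep, if_neg hb, ht, hrev, pvRowStep, e0, e1, e2, em1, em2]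
      rw [hstep]
      exact ih (fun x hx => hpre x (List.mem_cons_of_mem _ hx)) (pvDataStep d l)

-- ---- the data lines Pre_ talks about are the ones both ports process ----
theorem pvFindGt_rest (LS : List String) (d : String) (rest : List String)
    (h : pvFindGt LS = some (d, rest)) :
    ∃ i, LS.findIdx? (fun l => PySem.Str.isIn ">" l) = some i ∧ rest = LS.drop (i + 1) := by
  induction LS generalizing d rest with
  | nil => simp [pvFindGt] at h
  | cons l ls ih =>
    rw [pvFindGt] at h
    by_cases hl : PySem.Str.isIn ">" l
    · rw [if_pos hl] at h
      simp only [Option.some.injEq, Prod.mk.injEq] at h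
      obtain ⟨-, hr⟩ := h
      refine ⟨0, by rw [List.findIdx?_cons, if_pos hl], by simpa using hr.symm⟩
    · rw [if_neg hl] at h
      obtain ⟨i, hi, hr⟩ := ih _ _ h
      exact ⟨i + 1, by rw [List.findIdx?_cons, if_neg hl, hi]; rfl, by simpa using hr⟩

theorem pvFindDev_rest (LS : List String) (rest : List String)
    (h : pvFindDev LS = some rest) :
    ∃ j, LS.findIdx? (fun l => PySem.Str.isIn "Device" l) = some j ∧ rest = LS.drop (j + 1) := by
  induction LS generalizing rest with
  | nil => simp [pvFindDev] at h
  | cons l ls ih =>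
    rw [pvFindDev] at h
    by_cases hl : PySem.Str.isIn "Device" l
    · rw [if_pos hl] at h
      simp only [Option.some.injEq] at h
      refine ⟨0, by rw [List.findIdx?_cons, if_pos hl], by simpa using h.symm⟩
    · rw [if_neg hl] at h
      obtain ⟨j, hj, hr⟩ := ih _ h
      exact ⟨j + 1, by rw [List.findIdx?_cons, if_neg hl, hj]; rfl, by simpa using hr⟩

theorem pvDataLinesOf_eq (s : String) (d : String) (rest ls : List String)
    (hg : pvFindGt ((PySem.Str.split? s "\n").getD []) = some (d, rest))
    (hd : pvFindDev rest = some ls) :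
    pvDataLinesOf s = ls := by
  obtain ⟨i, hi, hri⟩ := pvFindGt_rest _ _ _ hg
  obtain ⟨j, hj, hrj⟩ := pvFindDev_rest _ _ hd
  rw [pvDataLinesOf]
  simp only [hi, ← hri, hj, ← hrj]

-- ===== VERDICT (by name: the statement is the Claim_ definition above) =====
theorem parse_sh_cdp_neighbors_spec : Claim_equal_parse_sh_cdp_neighbors := by
  intro s _ hpre
  unfold Spec_parse_sh_cdp_neighbors parse_sh_cdp_neighbors parse_sh_cdp_neighbors_alt
  simp only [pvFoldA_stage0]
  have hmap := pvLines_map s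
  have h1 := pvML1 ((PySem.Str.split? s "\n").getD []) s.toList hmap
  cases hfg : pvFindGt ((PySem.Str.split? s "\n").getD []) with
  | none =>
    rw [hfg] at h1
    have hfind : PySem.Str.find s ">" = -1 := by rw [PySem.Str.find_eq]; exact h1
    simp only [hfind, if_pos rfl]
    rfl
  | some p =>
    obtain ⟨d, rest⟩ := p
    rw [hfg] at h1
    obtain ⟨g, hgfind, hdev, hrest⟩ := h1
    have hfind : PySem.Str.find s ">" = (g : Int) := by rw [PySem.Str.find_eq]; exact hgfind
    have hg_lt : g < s.toList.length := pvFound_lt_length _ _ _ (by simp) hgfind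
    -- B's device equals A's d
    have hm' : ((PySem.Str.split? (PySem.Str.slice s none (some (g : Int))) "\n").getD []).map String.toList
        = pvSplitC '\n' [] (s.toList.take g) := by
      rw [pvLines_map, PySem.Str.toList_slice, PySem.Chars.slice_eq_listSlice,
        PySem.List.slice_to _ (by positivity)]
      simp
    have hne' : ((PySem.Str.split? (PySem.Str.slice s none (some (g : Int))) "\n").getD []) ≠ [] := by
      intro hc
      rw [hc] at hm'
      exact pvSplitC_ne_nil _ _ _ hm'.symm
    have hdevB : PySem.List.pyGetD
        ((PySem.Str.split? (PySem.Str.slice s none (some (g : Int))) "\n").getD []) (-1) "" = d := by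
      rw [PySem.List.pyGetD_neg_one _ _ hne']
      rw [← hm', List.getLast?_map, List.getLast?_eq_some_getLast hne'] at hdev
      simp only [Option.map_some, Option.some.injEq] at hdev
      exact String.toList_inj.mp hdev
    have heol : PySem.Str.findFrom s "\n" ((g : Int)) =
        (if PySem.Chars.find (s.toList.drop g) ['\n'] = -1 then -1
         else (g : Int) + PySem.Chars.find (s.toList.drop g) ['\n']) := by
      rw [PySem.Str.findFrom_eq]
      exact PySem.Chars.findFrom_natCast s.toList _ g (by omega)
    rcases hrest with ⟨hrnil, hneg⟩ | ⟨e, he, hmap2⟩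
    · -- the '>' line is the last line: no Device header, empty result
      subst hrnil
      simp only [pvFoldA_stage1]
      simp only [pvFindDev]
      simp only [hfind, if_neg (by omega : ¬ ((g : Int) = -1)), heol, hneg, if_pos rfl, hdevB]
      rfl
    · have he_lt : e < (s.toList.drop g).length := pvFound_lt_length _ _ _ (by simp) he
      rw [List.length_drop] at he_lt
      have heol' : PySem.Str.findFrom s "\n" ((g : Int)) = (g : Int) + (e : Int) := by
        rw [heol, he, if_neg (by omega)]
      have hdi : PySem.Str.findFrom s "Device" ((g : Int) + (e : Int) + 1) =
          (if PySem.Chars.find ((s.toList.drop g).drop (e + 1)) ("Device" : String).toList = -1 then -1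
           else ((g + e + 1 : Nat) : Int) +
             PySem.Chars.find ((s.toList.drop g).drop (e + 1)) ("Device" : String).toList) := by
        rw [PySem.Str.findFrom_eq,
          show (g : Int) + (e : Int) + 1 = ((g + e + 1 : Nat) : Int) by push_cast; ring,
          PySem.Chars.findFrom_natCast s.toList _ (g + e + 1) (by omega)]
        rw [List.drop_drop, show g + (e + 1) = g + e + 1 from by omega]
      have h2 := pvML2 rest ((s.toList.drop g).drop (e + 1)) hmap2
      simp only [pvFoldA_stage1]
      cases hfd : pvFindDev rest with
      | none =>
        rw [hfd] at h2
        simp only [hfind, if_neg (by omega : ¬ ((g : Int) = -1)), heol',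
          if_neg (by omega : ¬ ((g : Int) + (e : Int) = -1)), hdi, h2, hdevB]
        rfl
      | some ls =>
        rw [hfd] at h2
        obtain ⟨dn, hdn, hrest2⟩ := h2
        have hdn_le : dn ≤ ((s.toList.drop g).drop (e + 1)).length := by
          have := PySem.Chars.find_le_length ((s.toList.drop g).drop (e + 1)) ("Device" : String).toList
          omega
        rw [List.length_drop, List.length_drop] at hdn_le
        have hdi' : PySem.Str.findFrom s "Device" ((g : Int) + (e : Int) + 1)
            = ((g + e + 1 + dn : Nat) : Int) := by
          rw [hdi, hdn, if_neg (by omega)]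
          push_cast; ring
        have heol2 : PySem.Str.findFrom s "\n" (((g + e + 1 + dn : Nat) : Int)) =
            (if PySem.Chars.find ((((s.toList.drop g).drop (e + 1)).drop dn)) ['\n'] = -1 then -1
             else ((g + e + 1 + dn : Nat) : Int) +
               PySem.Chars.find ((((s.toList.drop g).drop (e + 1)).drop dn)) ['\n']) := by
          rw [PySem.Str.findFrom_eq,
            PySem.Chars.findFrom_natCast s.toList _ (g + e + 1 + dn) (by omega)]
          rw [List.drop_drop, List.drop_drop, show g + (e + 1 + dn) = g + e + 1 + dn from by omega,
            show ("\n" : String).toList = ['\n'] from rfl]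
        simp only [pvFoldA_stage2]
        rcases hrest2 with ⟨hlnil, hneg2⟩ | ⟨e2, he2, hmap3⟩
        · subst hlnil
          simp only [hfind, if_neg (by omega : ¬ ((g : Int) = -1)), heol',
            if_neg (by omega : ¬ ((g : Int) + (e : Int) = -1)), hdi',
            if_neg (by omega : ¬ (((g + e + 1 + dn : Nat) : Int) = -1)),
            heol2, hneg2, hdevB]
          rfl
        · have hm3 : ((PySem.Str.split? (PySem.Str.slice s
              (some (((g + e + 1 + dn : Nat) : Int) + (e2 : Int) + 1)) none) "\n").getD []).map String.toList
              = pvSplitC '\n' [] (((((s.toList.drop g).drop (e + 1)).drop dn)).drop (e2 + 1)) := by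
            rw [pvLines_map, PySem.Str.toList_slice, PySem.Chars.slice_eq_listSlice,
              PySem.List.slice_from _ (by positivity)]
            rw [show ((((g + e + 1 + dn : Nat) : Int) + (e2 : Int) + 1)).toNat
                = g + e + 1 + dn + e2 + 1 by omega]
            rw [List.drop_drop, List.drop_drop, List.drop_drop,
              show g + (e + 1 + (dn + (e2 + 1))) = g + e + 1 + dn + e2 + 1 from by omega]
          have hlt : ((PySem.Str.split? (PySem.Str.slice s
              (some (((g + e + 1 + dn : Nat) : Int) + (e2 : Int) + 1)) none) "\n").getD []) = ls := by
            have hmm := hm3.trans hmap3.symm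
            exact List.map_injective_iff.mpr (fun a b hab => String.toList_inj.mp hab) hmm
          have hcond : ∀ l ∈ ls, PySem.Str.strip l ≠ "" → 4 ≤ (PySem.Str.split₀ l).length := by
            rw [← pvDataLinesOf_eq s d rest ls hfg hfd]
            exact hpre
          simp only [hfind, if_neg (by omega : ¬ ((g : Int) = -1)), heol',
            if_neg (by omega : ¬ ((g : Int) + (e : Int) = -1)), hdi',
            if_neg (by omega : ¬ (((g + e + 1 + dn : Nat) : Int) = -1)),
            heol2, he2, if_neg (by omega : ¬ ((e2 : Int) = -1)),
            if_neg (by omega : ¬ (((g + e + 1 + dn : Nat) : Int) + (e2 : Int) = -1)),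
            hdevB, hlt]
          rw [pvML3 ls hcond]
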